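-- pv_equiv track=rewrite | github.com/shla9937/archaeal_histone_diversity | histone_gram.py | make_gradient_inputs
-- ===== SOURCE A (Python) =====
-- def make_gradient_inputs(conserv_hist_inputs):
--     cluster_5_or_over = []
--     cluster_4 = []
--     cluster_3 = []
--     cluster_2 = []
--     no_cluster = []
--     below_threshold = conserv_hist_inputs[1]
--     current_cluster = []
--     residue_idx = 0
--
--     for i in conserv_hist_inputs[0]:
--         if i[0] == residue_idx:
--             current_cluster.append(i)
--             residue_idx += 1
--         else:
--             if len(current_cluster) >= 5:
--                 for j in current_cluster:
--                     cluster_5_or_over.append(j)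
--                 current_cluster = []
--                 current_cluster.append(i)
--                 residue_idx = i[0]+1
--             elif len(current_cluster) == 4:
--                 for j in current_cluster:
--                     cluster_4.append(j)
--                 current_cluster = []
--                 current_cluster.append(i)
--                 residue_idx = i[0]+1
--             elif len(current_cluster) == 3:
--                 for j in current_cluster:
--                     cluster_3.append(j)
--                 current_cluster = []
--                 current_cluster.append(i)
--                 residue_idx = i[0]+1
--             elif len(current_cluster) == 2:
--                 for j in current_cluster:
--                     cluster_2.append(j)
--                 current_cluster = []
--                 current_cluster.append(i)
--                 residue_idx = i[0]+1
--             elif len(current_cluster) == 1: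
--                 for j in current_cluster:
--                     no_cluster.append(j)
--                 current_cluster = []
--                 current_cluster.append(i)
--                 residue_idx = i[0]+1
--             elif len(current_cluster) == 0:
--                 current_cluster = []
--                 current_cluster.append(i)
--                 residue_idx = i[0]+1
--
--     if len(current_cluster) >= 5:
--         for j in current_cluster:
--             cluster_5_or_over.append(j)
--     elif len(current_cluster) == 4:
--         for j in current_cluster:
--             cluster_4.append(j)
--     elif len(current_cluster) == 3:
--         for j in current_cluster:
--             cluster_3.append(j)
--     elif len(current_cluster) == 2:
--         for j in current_cluster:
--             cluster_2.append(j)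
--     elif len(current_cluster) == 1:
--         for j in current_cluster:
--             no_cluster.append(j)
--
--     conserv_hist_inputs = [cluster_5_or_over, cluster_4, cluster_3, cluster_2, no_cluster, below_threshold]
--     return conserv_hist_inputs
-- ===== SOURCE B (Python) =====
-- def make_gradient_inputs(conserv_hist_inputs):
--     res = conserv_hist_inputs[0]
--     # backward count: back[i] = number of elements of i's run strictly before i
--     back = []
--     b = 0
--     prev = None
--     for r in res:
--         if prev is not None and r[0] == prev[0] + 1:
--             b += 1
--         else:
--             b = 0
--         back.append(b)
--         prev = r
--     # forward count: fwd[i] = number of elements of i's run from i to its end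
--     fwd = []
--     f = 0
--     nxt = None
--     for r in reversed(res):
--         if nxt is not None and nxt[0] == r[0] + 1:
--             f += 1
--         else:
--             f = 1
--         fwd.append(f)
--         nxt = r
--     fwd.reverse()
--     # runlen[i] = full length of the run containing i
--     runlen = [u + v for u, v in zip(back, fwd)]
--     # each output bucket is an independent order-preserving filter of res
--     out = [[r for r, L in zip(res, runlen) if min(L, 5) == k] for k in (5, 4, 3, 2, 1)]
--     out.append(conserv_hist_inputs[1])
--     return out
-- ===== Notes on version B (the rewrite author's own statement) =====
-- stated objective: alternative
-- what changed: A's interleaved residue_idx state machine that mutates one of five bucket lists as it goes (with a duplicated post-loop flush chain) is replaced by a scan-based scheme: a forward and a backward counting scan compute each element's run length (back[i]+fwd[i]), and each output bucket is then an independent order-preserving filter of the residue list by min(runlen,5) -- no run is ever materialized and no bucket is mutated during the scans.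
import Mathlib
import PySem

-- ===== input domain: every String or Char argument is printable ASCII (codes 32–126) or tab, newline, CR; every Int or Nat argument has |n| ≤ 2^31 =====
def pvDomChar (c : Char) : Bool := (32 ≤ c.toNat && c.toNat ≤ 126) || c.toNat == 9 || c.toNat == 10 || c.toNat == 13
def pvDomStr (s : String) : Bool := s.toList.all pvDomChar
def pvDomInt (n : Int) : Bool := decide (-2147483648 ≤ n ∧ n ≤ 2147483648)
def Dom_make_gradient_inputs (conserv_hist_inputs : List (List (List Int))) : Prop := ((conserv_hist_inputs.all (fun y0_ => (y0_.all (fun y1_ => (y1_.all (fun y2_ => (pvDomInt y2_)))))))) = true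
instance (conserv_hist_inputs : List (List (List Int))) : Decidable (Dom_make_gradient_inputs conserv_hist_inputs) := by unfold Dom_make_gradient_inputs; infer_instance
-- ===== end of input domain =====

-- B replaces A's interleaved residue_idx state machine (which mutates one of five
-- bucket lists as it goes) by two counting scans that give each element its run
-- length, followed by one independent filter per bucket; objective: alternative.

-- ===== PORT A =====
-- A's loop state: (cluster_5_or_over, cluster_4, cluster_3, cluster_2, no_cluster, current_cluster, residue_idx)
def mgiStateA : Type := List (List Int) × List (List Int) × List (List Int) × List (List Int) × List (List Int) × List (List Int) × Int

def mgiStepA (st : mgiStateA) (i : List Int) : mgiStateA :=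
  let (c5, c4, c3, c2, nc, cur, ridx) := st
  -- i[0]: Pre_ guarantees i ≠ [], where headI is exactly Python's i[0]
  if i.headI = ridx then (c5, c4, c3, c2, nc, cur ++ [i], ridx + 1)
  else if cur.length ≥ 5 then (c5 ++ cur, c4, c3, c2, nc, [i], i.headI + 1)
  else if cur.length = 4 then (c5, c4 ++ cur, c3, c2, nc, [i], i.headI + 1)
  else if cur.length = 3 then (c5, c4, c3 ++ cur, c2, nc, [i], i.headI + 1)
  else if cur.length = 2 then (c5, c4, c3, c2 ++ cur, nc, [i], i.headI + 1)
  else if cur.length = 1 then (c5, c4, c3, c2, nc ++ cur, [i], i.headI + 1)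
  else (c5, c4, c3, c2, nc, [i], i.headI + 1)

def make_gradient_inputs (conserv_hist_inputs : List (List (List Int))) : List (List (List Int)) :=
  match conserv_hist_inputs with
  | residues :: below :: _ =>
    let st := residues.foldl mgiStepA ([], [], [], [], [], [], 0)
    let (c5, c4, c3, c2, nc, cur, _) := st
    if cur.length ≥ 5 then [c5 ++ cur, c4, c3, c2, nc, below]
    else if cur.length = 4 then [c5, c4 ++ cur, c3, c2, nc, below]
    else if cur.length = 3 then [c5, c4, c3 ++ cur, c2, nc, below]
    else if cur.length = 2 then [c5, c4, c3, c2 ++ cur, nc, below]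
    else if cur.length = 1 then [c5, c4, c3, c2, nc ++ cur, below]
    else [c5, c4, c3, c2, nc, below]
  | _ => []  -- Python raises IndexError here; excluded by Pre_

-- ===== PORT B =====
-- Source B's first loop: back[i] = elements of i's run strictly before i (state: prev, b)
def mgiBack : Option (List Int) → Nat → List (List Int) → List Nat
  | _, _, [] => []
  | prev, b, r :: rest =>
    let b' := match prev with
      | some p => if r.headI = p.headI + 1 then b + 1 else 0
      | none => 0
    b' :: mgiBack (some r) b' rest

-- Source B's second loop, over reversed(res): fwd counts from each element to its run's end
def mgiFwdRev : Option (List Int) → Nat → List (List Int) → List Nat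
  | _, _, [] => []
  | nxt, f, r :: rest =>
    let f' := match nxt with
      | some nx => if nx.headI = r.headI + 1 then f + 1 else 1
      | none => 1
    f' :: mgiFwdRev (some r) f' rest

def make_gradient_inputs_alt (conserv_hist_inputs : List (List (List Int))) : List (List (List Int)) :=
  -- conserv_hist_inputs[0] / [1]: Pre_ guarantees length ≥ 2, where headI is exact
  let res := conserv_hist_inputs.headI
  let below := conserv_hist_inputs.tail.headI
  let back := mgiBack none 0 res
  let fwd := (mgiFwdRev none 0 res.reverse).reverse
  let runlen := List.zipWith (· + ·) back fwd
  let bucket := fun (k : Nat) =>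
    (res.zip runlen).filterMap (fun p => if min p.2 5 = k then some p.1 else none)
  [bucket 5, bucket 4, bucket 3, bucket 2, bucket 1, below]

-- ===== PRECONDITION & SPEC =====
-- Pre_ excludes exactly the inputs where Python A raises IndexError: fewer than two
-- top-level lists, or an empty residue (i[0] fails).
def Pre_make_gradient_inputs (conserv_hist_inputs : List (List (List Int))) : Prop :=
  2 ≤ conserv_hist_inputs.length ∧ ∀ r ∈ conserv_hist_inputs.headI, r ≠ []
instance (conserv_hist_inputs : List (List (List Int))) : Decidable (Pre_make_gradient_inputs conserv_hist_inputs) := by unfold Pre_make_gradient_inputs; infer_instance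

def pvWitness_make_gradient_inputs : List (List (List Int)) := [[[0], [1], [5]], [[9]]]

def Spec_make_gradient_inputs (conserv_hist_inputs : List (List (List Int))) (out : List (List (List Int))) : Prop := out = make_gradient_inputs_alt conserv_hist_inputs
instance (conserv_hist_inputs : List (List (List Int))) (out : List (List (List Int))) : Decidable (Spec_make_gradient_inputs conserv_hist_inputs out) := by unfold Spec_make_gradient_inputs; infer_instance

-- ===== CLAIM (what is proved, stated in full; the proofs are below) =====
def Claim_equal_make_gradient_inputs : Prop := ∀ (conserv_hist_inputs : List (List (List Int))), Dom_make_gradient_inputs conserv_hist_inputs → Pre_make_gradient_inputs conserv_hist_inputs → Spec_make_gradient_inputs conserv_hist_inputs (make_gradient_inputs conserv_hist_inputs)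

-- ===== LEMMAS AND PROOFS =====

-- ---- the run decomposition both sides are proved against ----
-- "y continues x's run"
def mgiStep (x y : List Int) : Prop := y.headI = x.headI + 1
-- "chunk d does not continue chunk c"
def mgiBreakRel (c d : List (List Int)) : Prop := ¬ mgiStep (c.getLast?.getD []) d.headI

def takeRun : List Int → List (List Int) → List (List Int) × List (List Int)
  | _, [] => ([], [])
  | p, r :: rest =>
    if r.headI = p.headI + 1 then ((r :: (takeRun r rest).1), (takeRun r rest).2)
    else ([], r :: rest)

lemma takeRun_snd_len : ∀ (l : List (List Int)) (p : List Int), (takeRun p l).2.length ≤ l.length := by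
  intro l
  induction l with
  | nil => intro p; simp [takeRun]
  | cons r rest ih =>
    intro p
    simp only [takeRun]
    split_ifs
    · exact le_trans (ih r) (by simp)
    · simp

def runsOf : List (List Int) → List (List (List Int))
  | [] => []
  | r :: rest => (r :: (takeRun r rest).1) :: runsOf (takeRun r rest).2
termination_by l => l.length
decreasing_by
  have := takeRun_snd_len rest r
  simp only [List.length_cons]
  omega

lemma takeRun_flatten : ∀ (l : List (List Int)) (p : List Int),
    (takeRun p l).1 ++ (takeRun p l).2 = l := by
  intro l
  induction l with
  | nil => intro p; simp [takeRun]
  | cons r rest ih =>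
    intro p
    simp only [takeRun]
    split_ifs
    · simpa using ih r
    · simp

lemma takeRun_chain : ∀ (l : List (List Int)) (p : List Int),
    List.IsChain mgiStep (p :: (takeRun p l).1) := by
  intro l
  induction l with
  | nil => intro p; simp [takeRun]
  | cons r rest ih =>
    intro p
    simp only [takeRun]
    split_ifs with h
    · refine (ih r).cons ?_
      intro y hy
      simp only [List.head?_cons, Option.mem_def, Option.some.injEq] at hy
      subst hy
      exact h
    · simp

lemma takeRun_break : ∀ (l : List (List Int)) (p : List Int),
    (takeRun p l).2 ≠ [] →
    ¬ mgiStep ((takeRun p l).1.getLastD p) (takeRun p l).2.headI := by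
  intro l
  induction l with
  | nil => intro p h; simp [takeRun] at h
  | cons r rest ih =>
    intro p h
    simp only [takeRun] at h ⊢
    split_ifs with hc
    · simp only [List.getLastD_cons]
      exact ih r (by simpa [takeRun, hc] using h)
    · simpa [mgiStep] using hc

lemma runsOf_flatten (res : List (List Int)) : (runsOf res).flatten = res := by
  induction res using runsOf.induct with
  | case1 => simp [runsOf]
  | case2 r rest ih =>
    simp only [runsOf, List.flatten_cons, ih, List.cons_append]
    rw [takeRun_flatten]

lemma runsOf_runs (res : List (List Int)) :
    ∀ c ∈ runsOf res, c ≠ [] ∧ List.IsChain mgiStep c := by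
  induction res using runsOf.induct with
  | case1 => simp [runsOf]
  | case2 r rest ih =>
    intro c hc
    simp only [runsOf, List.mem_cons] at hc
    rcases hc with h | h
    · subst h; exact ⟨by simp, takeRun_chain rest r⟩
    · exact ih c h

lemma getLast?_getD_cons (r : List Int) (a : List (List Int)) :
    ((r :: a).getLast?.getD []) = a.getLastD r := by
  induction a generalizing r with
  | nil => rfl
  | cons x xs ih => rw [List.getLast?_cons_cons, ih x, List.getLastD_cons]

lemma runsOf_break (res : List (List Int)) :
    List.IsChain mgiBreakRel (runsOf res) := by
  induction res using runsOf.induct with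
  | case1 => simp [runsOf]
  | case2 r rest ih =>
    simp only [runsOf]
    refine ih.cons ?_
    intro d hd
    rcases hb : (takeRun r rest).2 with _ | ⟨q, b'⟩
    · rw [hb] at hd; simp [runsOf] at hd
    · rw [hb] at hd
      simp only [runsOf, List.head?_cons, Option.mem_def, Option.some.injEq] at hd
      subst hd
      have := takeRun_break rest r (by rw [hb]; simp)
      rw [hb] at this
      simpa [mgiBreakRel, getLast?_getD_cons] using this

-- ---- A side: the state machine equals a per-run flush fold ----
def mgiGroupStep (p : List (List (List Int)) × List (List Int)) (r : List Int) :
    List (List (List Int)) × List (List Int) :=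
  let (clusters, cur) := p
  if cur ≠ [] ∧ r.headI ≠ (cur.getLast?.getD []).headI + 1 then (clusters ++ [cur], [r])
  else (clusters, cur ++ [r])

def mgiFlush (t : List (List Int) × List (List Int) × List (List Int) × List (List Int) × List (List Int))
    (cur : List (List Int)) :
    List (List Int) × List (List Int) × List (List Int) × List (List Int) × List (List Int) :=
  let (c5, c4, c3, c2, nc) := t
  if cur.length ≥ 5 then (c5 ++ cur, c4, c3, c2, nc)
  else if cur.length = 4 then (c5, c4 ++ cur, c3, c2, nc)
  else if cur.length = 3 then (c5, c4, c3 ++ cur, c2, nc)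
  else if cur.length = 2 then (c5, c4, c3, c2 ++ cur, nc)
  else if cur.length = 1 then (c5, c4, c3, c2, nc ++ cur)
  else (c5, c4, c3, c2, nc)

-- the grouping fold only appends to the cluster list
lemma group_ctx (residues : List (List Int)) :
    ∀ (clusters : List (List (List Int))) (cur : List (List Int)),
    residues.foldl mgiGroupStep (clusters, cur) =
      (clusters ++ (residues.foldl mgiGroupStep ([], cur)).1,
       (residues.foldl mgiGroupStep ([], cur)).2) := by
  induction residues with
  | nil => intro clusters cur; simp
  | cons r rest ih =>
    intro clusters cur
    simp only [List.foldl_cons]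
    by_cases h : cur ≠ [] ∧ r.headI ≠ (cur.getLast?.getD []).headI + 1
    · simp only [mgiGroupStep, if_pos h, List.nil_append]
      rw [ih (clusters ++ [cur]) [r], ih [cur] [r]]
      simp
    · simp only [mgiGroupStep, if_neg h, List.nil_append]
      exact ih clusters (cur ++ [r])

lemma group_ne (residues : List (List Int)) :
    ∀ (clusters : List (List (List Int))) (cur : List (List Int)), cur ≠ [] →
    (residues.foldl mgiGroupStep (clusters, cur)).2 ≠ [] := by
  induction residues with
  | nil => intro clusters cur h; simpa using h
  | cons r rest ih =>
    intro clusters cur h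
    simp only [List.foldl_cons, mgiGroupStep]
    split_ifs
    · exact ih _ [r] (by simp)
    · exact ih _ (cur ++ [r]) (by simp)

-- B's run splitter agrees with the grouping fold continuation
lemma group_takeRun (rest : List (List Int)) :
    ∀ (p : List Int) (cur : List (List Int)) (clusters : List (List (List Int))),
    cur ≠ [] → cur.getLast?.getD [] = p →
    rest.foldl mgiGroupStep (clusters, cur) =
      (match (takeRun p rest).2 with
       | [] => (clusters, cur ++ (takeRun p rest).1)
       | r :: b' => b'.foldl mgiGroupStep (clusters ++ [cur ++ (takeRun p rest).1], [r])) := by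
  induction rest with
  | nil => intro p cur clusters _ _; simp [takeRun]
  | cons r rest ih =>
    intro p cur clusters hcur hlast
    simp only [takeRun, List.foldl_cons]
    by_cases hc : r.headI = p.headI + 1
    · have hstep : mgiGroupStep (clusters, cur) r = (clusters, cur ++ [r]) := by
        have : ¬ (cur ≠ [] ∧ r.headI ≠ (cur.getLast?.getD []).headI + 1) := by
          intro h; exact h.2 (by rw [hlast]; exact hc)
        simp [mgiGroupStep, this]
      rw [hstep, if_pos hc]
      have := ih r (cur ++ [r]) clusters (by simp) (by simp)
      rw [this]
      rcases (takeRun r rest).2 with _ | ⟨q, b'⟩ <;> simp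
    · have hstep : mgiGroupStep (clusters, cur) r = (clusters ++ [cur], [r]) := by
        have : cur ≠ [] ∧ r.headI ≠ (cur.getLast?.getD []).headI + 1 := by
          refine ⟨hcur, ?_⟩; rw [hlast]; exact hc
        simp [mgiGroupStep, this]
      rw [hstep, if_neg hc]
      simp

-- the whole grouping pipeline produces exactly the run decomposition
lemma group_eq_runsOf (res : List (List Int)) :
    (if (res.foldl mgiGroupStep ([], [])).2 ≠ []
     then (res.foldl mgiGroupStep ([], [])).1 ++ [(res.foldl mgiGroupStep ([], [])).2]
     else (res.foldl mgiGroupStep ([], [])).1) = runsOf res := by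
  induction res using runsOf.induct with
  | case1 => simp [runsOf]
  | case2 r rest ih =>
    have h0 : mgiGroupStep ([], []) r = ([], [r]) := by simp [mgiGroupStep]
    simp only [List.foldl_cons, h0]
    rw [group_takeRun rest r [r] [] (by simp) (by simp)]
    rcases hb : (takeRun r rest).2 with _ | ⟨q, b'⟩
    · simp [runsOf, hb]
    · have hq : mgiGroupStep ([], []) q = ([], [q]) := by simp [mgiGroupStep]
      have hfold : (takeRun r rest).2.foldl mgiGroupStep ([], []) = b'.foldl mgiGroupStep ([], [q]) := by
        rw [hb]; simp [List.foldl_cons, hq]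
      have hne : (b'.foldl mgiGroupStep ([], [q])).2 ≠ [] := group_ne b' [] [q] (by simp)
      have ihb := ih
      rw [hfold] at ihb
      simp only [hne, ne_eq, not_false_eq_true, if_pos] at ihb
      simp only [List.nil_append]
      rw [group_ctx b' [[r] ++ (takeRun r rest).1] [q]]
      have h2 : ((b'.foldl mgiGroupStep ([], [q])).2 : List (List Int)) ≠ [] := hne
      simp only [h2, ne_eq, not_false_eq_true, if_pos]
      conv_rhs => rw [runsOf]
      rw [← ihb]
      simp

-- A's loop runs the grouping fold while flushing finished runs into the buckets
lemma loop_eq (residues : List (List Int)) :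
    ∀ (c5 c4 c3 c2 nc cur : List (List Int)) (ridx : Int),
    (∀ r, r ∈ residues → r ≠ []) →
    (cur ≠ [] → ridx = (cur.getLast?.getD []).headI + 1) →
    ∃ rfinal,
    residues.foldl mgiStepA (c5, c4, c3, c2, nc, cur, ridx) =
      ((((residues.foldl mgiGroupStep ([], cur)).1.foldl mgiFlush (c5, c4, c3, c2, nc)).1,
        (((residues.foldl mgiGroupStep ([], cur)).1.foldl mgiFlush (c5, c4, c3, c2, nc)).2.1),
        (((residues.foldl mgiGroupStep ([], cur)).1.foldl mgiFlush (c5, c4, c3, c2, nc)).2.2.1),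
        (((residues.foldl mgiGroupStep ([], cur)).1.foldl mgiFlush (c5, c4, c3, c2, nc)).2.2.2.1),
        (((residues.foldl mgiGroupStep ([], cur)).1.foldl mgiFlush (c5, c4, c3, c2, nc)).2.2.2.2),
        (residues.foldl mgiGroupStep ([], cur)).2, rfinal)) := by
  induction residues with
  | nil =>
    intro c5 c4 c3 c2 nc cur ridx _ _
    exact ⟨ridx, rfl⟩
  | cons r rest ih =>
    intro c5 c4 c3 c2 nc cur ridx hne hinv
    have hres : ∀ x, x ∈ rest → x ≠ [] := fun x hx => hne x (List.mem_cons_of_mem _ hx)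
    simp only [List.foldl_cons]
    by_cases hcur : cur = []
    · subst hcur
      have hB : mgiGroupStep ([], []) r = ([], [r]) := by simp [mgiGroupStep]
      have hA : mgiStepA (c5, c4, c3, c2, nc, [], ridx) r = (c5, c4, c3, c2, nc, [r], r.headI + 1) := by
        by_cases hi : r.headI = ridx
        · simp [mgiStepA, hi]
        · simp [mgiStepA, hi]
      rw [hA, hB]
      exact ih c5 c4 c3 c2 nc [r] (r.headI + 1) hres (by simp)
    · have hrx := hinv hcur
      by_cases hc : r.headI = ridx
      · have hB : mgiGroupStep ([], cur) r = ([], cur ++ [r]) := by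
          have : ¬ (cur ≠ [] ∧ r.headI ≠ (cur.getLast?.getD []).headI + 1) := by
            intro h; exact h.2 (by rw [hc, hrx])
          simp [mgiGroupStep, this]
        have hA : mgiStepA (c5, c4, c3, c2, nc, cur, ridx) r =
            (c5, c4, c3, c2, nc, cur ++ [r], ridx + 1) := by
          simp [mgiStepA, hc]
        rw [hA, hB]
        refine ih c5 c4 c3 c2 nc (cur ++ [r]) (ridx + 1) hres ?_
        intro _
        have hl : (cur ++ [r]).getLast?.getD [] = r := by simp
        rw [hl, hc]
      · have hcond : cur ≠ [] ∧ r.headI ≠ (cur.getLast?.getD []).headI + 1 := by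
          refine ⟨hcur, ?_⟩
          rw [← hrx]; exact hc
        have hB : mgiGroupStep ([], cur) r = ([cur], [r]) := by
          simp [mgiGroupStep, hcond]
        rcases hF : mgiFlush (c5, c4, c3, c2, nc) cur with ⟨a5, a4, a3, a2, a1⟩
        have hA : mgiStepA (c5, c4, c3, c2, nc, cur, ridx) r = (a5, a4, a3, a2, a1, [r], r.headI + 1) := by
          simp only [mgiStepA, mgiFlush] at hF ⊢
          rw [if_neg hc]
          split_ifs at hF ⊢ <;> simp_all
        rw [hA, hB]
        obtain ⟨rf, hrec⟩ := ih a5 a4 a3 a2 a1 [r] (r.headI + 1) hres (by simp)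
        refine ⟨rf, ?_⟩
        rw [hrec, group_ctx rest [cur] [r]]
        simp [hF]

-- A's final flush block rendered, for any cur (len 0 case is the trailing 'no change')
lemma finalA_eq (c5 c4 c3 c2 nc : List (List Int)) (cur : List (List Int)) (below : List (List Int)) :
    (if cur.length ≥ 5 then [c5 ++ cur, c4, c3, c2, nc, below]
     else if cur.length = 4 then [c5, c4 ++ cur, c3, c2, nc, below]
     else if cur.length = 3 then [c5, c4, c3 ++ cur, c2, nc, below]
     else if cur.length = 2 then [c5, c4, c3, c2 ++ cur, nc, below]
     else if cur.length = 1 then [c5, c4, c3, c2, nc ++ cur, below]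
     else [c5, c4, c3, c2, nc, below]) =
    [(mgiFlush (c5, c4, c3, c2, nc) cur).1,
     (mgiFlush (c5, c4, c3, c2, nc) cur).2.1,
     (mgiFlush (c5, c4, c3, c2, nc) cur).2.2.1,
     (mgiFlush (c5, c4, c3, c2, nc) cur).2.2.2.1,
     (mgiFlush (c5, c4, c3, c2, nc) cur).2.2.2.2, below] := by
  simp only [mgiFlush]
  split_ifs <;> rfl

-- ---- the per-run bucket selection, and the flush fold computes it ----
def mgiSel (k : Nat) (C : List (List (List Int))) : List (List Int) :=
  C.flatMap (fun c => if min c.length 5 = k then c else [])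

lemma flush_sel (t5 t4 t3 t2 t1 : List (List Int)) (c : List (List Int)) :
    mgiFlush (t5, t4, t3, t2, t1) c =
      (t5 ++ (if min c.length 5 = 5 then c else []),
       t4 ++ (if min c.length 5 = 4 then c else []),
       t3 ++ (if min c.length 5 = 3 then c else []),
       t2 ++ (if min c.length 5 = 2 then c else []),
       t1 ++ (if min c.length 5 = 1 then c else [])) := by
  by_cases h5 : c.length ≥ 5
  · simp [mgiFlush, h5]
  · by_cases h4 : c.length = 4
    · simp [mgiFlush, h4]
    · by_cases h3 : c.length = 3
      · simp [mgiFlush, h3]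
      · by_cases h2 : c.length = 2
        · simp [mgiFlush, h2]
        · by_cases h1 : c.length = 1
          · simp [mgiFlush, h1]
          · have hc : c = [] := List.length_eq_zero_iff.mp (by omega)
            subst hc
            simp [mgiFlush]

lemma flush_fold (C : List (List (List Int))) :
    ∀ t5 t4 t3 t2 t1 : List (List Int),
    C.foldl mgiFlush (t5, t4, t3, t2, t1) =
      (t5 ++ mgiSel 5 C, t4 ++ mgiSel 4 C, t3 ++ mgiSel 3 C, t2 ++ mgiSel 2 C, t1 ++ mgiSel 1 C) := by
  induction C with
  | nil => intro t5 t4 t3 t2 t1; simp [mgiSel]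
  | cons c rest ih =>
    intro t5 t4 t3 t2 t1
    rw [List.foldl_cons, flush_sel, ih]
    simp [mgiSel, List.flatMap_cons, List.append_assoc]

-- ---- B side: the backward scan lists each run as 0,1,…,len-1 ----
lemma back_run (a : List (List Int)) :
    ∀ (p : List Int) (b : Nat) (t : List (List Int)),
    List.IsChain mgiStep (p :: a) →
    mgiBack (some p) b (a ++ t) =
      List.range' (b + 1) a.length ++ mgiBack (some (a.getLastD p)) (b + a.length) t := by
  induction a with
  | nil => intro p b t _; simp [List.getLastD]
  | cons r a' ih =>
    intro p b t hch
    have h1 : r.headI = p.headI + 1 := hch.rel_head? (by simp)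
    have hrest : List.IsChain mgiStep (r :: a') := (List.isChain_cons.mp hch).2
    have harith : b + (a'.length + 1) = (b + 1) + a'.length := by omega
    simp only [List.cons_append, mgiBack, h1, if_pos, List.length_cons, List.getLastD_cons,
      List.range'_succ, harith]
    rw [ih r (b + 1) t hrest]

lemma back_eq_aux (C : List (List (List Int))) :
    (∀ c ∈ C, c ≠ [] ∧ List.IsChain mgiStep c) →
    List.IsChain mgiBreakRel C →
    mgiBack none 0 C.flatten = C.flatMap (fun c => List.range c.length) := by
  induction C with
  | nil => intro _ _; rfl
  | cons c C' ih =>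
    intro hr hb
    obtain ⟨hne, hch⟩ := hr c (by simp)
    rcases c with _ | ⟨p, a⟩
    · exact absurd rfl hne
    have hr' : ∀ d ∈ C', d ≠ [] ∧ List.IsChain mgiStep d := fun d hd => hr d (by simp [hd])
    have hb' : List.IsChain mgiBreakRel C' := (List.isChain_cons.mp hb).2
    simp only [List.flatten_cons, List.cons_append]
    have : mgiBack none 0 (p :: (a ++ C'.flatten)) = 0 :: mgiBack (some p) 0 (a ++ C'.flatten) := rfl
    rw [this, back_run a p 0 C'.flatten hch]
    have hrestart : mgiBack (some (a.getLastD p)) (0 + a.length) C'.flatten = mgiBack none 0 C'.flatten := by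
      rcases C' with _ | ⟨d, D'⟩
      · rfl
      · obtain ⟨hdne, _⟩ := hr' d (by simp)
        rcases d with _ | ⟨q, a2⟩
        · exact absurd rfl hdne
        have hbr : mgiBreakRel (p :: a) (q :: a2) := (List.isChain_cons.mp hb).1 _ (by simp)
        have hq : ¬ (q.headI = (a.getLastD p).headI + 1) := by
          simpa [mgiBreakRel, mgiStep, getLast?_getD_cons] using hbr
        rw [List.getLastD_eq_getLast?] at hq
        simp [List.flatten_cons, List.cons_append, mgiBack, hq]
    rw [hrestart, ih hr' hb']
    simp only [List.flatMap_cons, List.length_cons]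
    have hrange : List.range (a.length + 1) = 0 :: List.range' 1 a.length := by
      rw [List.range_eq_range']
      rfl
    rw [hrange]
    simp

-- ---- B side: the scan over the reversed list counts each reversed run as 1,…,len ----
lemma fwd_run (a : List (List Int)) :
    ∀ (p : List Int) (f : Nat) (t : List (List Int)),
    List.IsChain (fun x y => mgiStep y x) (p :: a) →
    mgiFwdRev (some p) f (a ++ t) =
      List.range' (f + 1) a.length ++ mgiFwdRev (some (a.getLastD p)) (f + a.length) t := by
  induction a with
  | nil => intro p f t _; simp [List.getLastD]
  | cons r a' ih =>
    intro p f t hch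
    have h1 : p.headI = r.headI + 1 := hch.rel_head? (by simp)
    have hrest : List.IsChain (fun x y => mgiStep y x) (r :: a') := (List.isChain_cons.mp hch).2
    have harith : f + (a'.length + 1) = (f + 1) + a'.length := by omega
    simp only [List.cons_append, mgiFwdRev, h1, if_pos, List.length_cons, List.getLastD_cons,
      List.range'_succ, harith]
    rw [ih r (f + 1) t hrest]

lemma fwd_eq_aux (D : List (List (List Int))) :
    (∀ d ∈ D, d ≠ [] ∧ List.IsChain (fun x y => mgiStep y x) d) →
    List.IsChain (fun c d => ¬ mgiStep d.headI (c.getLast?.getD [])) D →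
    mgiFwdRev none 0 D.flatten = D.flatMap (fun d => List.range' 1 d.length) := by
  induction D with
  | nil => intro _ _; rfl
  | cons d D' ih =>
    intro hr hb
    obtain ⟨hne, hch⟩ := hr d (by simp)
    rcases d with _ | ⟨p, a⟩
    · exact absurd rfl hne
    have hr' : ∀ e ∈ D', e ≠ [] ∧ List.IsChain (fun x y => mgiStep y x) e := fun e he => hr e (by simp [he])
    have hb' : List.IsChain (fun c d => ¬ mgiStep d.headI (c.getLast?.getD [])) D' := (List.isChain_cons.mp hb).2
    simp only [List.flatten_cons, List.cons_append]
    have : mgiFwdRev none 0 (p :: (a ++ D'.flatten)) = 1 :: mgiFwdRev (some p) 1 (a ++ D'.flatten) := rfl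
    rw [this, fwd_run a p 1 D'.flatten hch]
    have hrestart : mgiFwdRev (some (a.getLastD p)) (1 + a.length) D'.flatten = mgiFwdRev none 0 D'.flatten := by
      rcases D' with _ | ⟨e, E'⟩
      · rfl
      · obtain ⟨hene, _⟩ := hr' e (by simp)
        rcases e with _ | ⟨q, a2⟩
        · exact absurd rfl hene
        have hbr : ¬ mgiStep (q :: a2).headI ((p :: a).getLast?.getD []) := (List.isChain_cons.mp hb).1 _ (by simp)
        have hq : ¬ ((a.getLastD p).headI = q.headI + 1) := by
          simpa [mgiStep, getLast?_getD_cons] using hbr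
        rw [List.getLastD_eq_getLast?] at hq
        simp [List.flatten_cons, List.cons_append, mgiFwdRev, hq]
    rw [hrestart, ih hr' hb']
    simp only [List.flatMap_cons, List.length_cons]
    have hrange : List.range' 1 (a.length + 1) = 1 :: List.range' 2 a.length := rfl
    rw [hrange]
    simp

-- ---- generic list plumbing ----
lemma headI_eq_head? (l : List (List Int)) : l.headI = l.head?.getD [] := by
  cases l <;> rfl

lemma flatMap_reverse {α β : Type} (l : List α) (g : α → List β) :
    (l.flatMap g).reverse = l.reverse.flatMap (fun x => (g x).reverse) := by
  induction l with
  | nil => rfl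
  | cons x xs ih => simp [List.flatMap_cons, List.flatMap_append, ih]

lemma zipWith_flatMap {α β γ σ : Type} (h' : α → β → γ) (C : List σ) (f : σ → List α) (g : σ → List β)
    (hl : ∀ c ∈ C, (f c).length = (g c).length) :
    List.zipWith h' (C.flatMap f) (C.flatMap g) = C.flatMap (fun c => List.zipWith h' (f c) (g c)) := by
  induction C with
  | nil => rfl
  | cons c C' ih =>
    simp only [List.flatMap_cons]
    rw [List.zipWith_append (hl c (by simp)), ih (fun c hc => hl c (by simp [hc]))]

lemma chunk_runlen (n : Nat) :
    List.zipWith (· + ·) (List.range n) ((List.range' 1 n).reverse) = List.replicate n n := by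
  apply List.ext_getElem
  · simp
  · intro i h1 h2
    simp only [List.getElem_zipWith, List.getElem_range, List.getElem_reverse, List.length_range',
      List.getElem_range', List.getElem_replicate]
    have hi : i < n := by simpa using h2
    omega

lemma zip_replicate_self {α : Type} (c : List α) (v : Nat) :
    List.zipWith Prod.mk c (List.replicate c.length v) = c.map (fun r => (r, v)) := by
  induction c with
  | nil => rfl
  | cons x xs ih => simp [List.replicate_succ, ih]

-- ---- B's pipeline computes the per-run bucket selection ----
lemma alt_bucket (res : List (List Int)) (k : Nat) :
    (res.zip (List.zipWith (· + ·) (mgiBack none 0 res) ((mgiFwdRev none 0 res.reverse).reverse))).filterMap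
      (fun p => if min p.2 5 = k then some p.1 else none) = mgiSel k (runsOf res) := by
  have hflat := runsOf_flatten res
  have hrun := runsOf_runs res
  have hbr := runsOf_break res
  -- the backward scan
  have hback : mgiBack none 0 res = (runsOf res).flatMap (fun c => List.range c.length) := by
    conv_lhs => rw [← hflat]
    exact back_eq_aux (runsOf res) hrun hbr
  -- the reversed-list scan
  have hDrev : res.reverse = (((runsOf res).map List.reverse).reverse).flatten := by
    conv_lhs => rw [← hflat]
    exact List.reverse_flatten
  have hDrun : ∀ d ∈ ((runsOf res).map List.reverse).reverse,
      d ≠ [] ∧ List.IsChain (fun x y => mgiStep y x) d := by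
    intro d hd
    rw [List.mem_reverse, List.mem_map] at hd
    obtain ⟨c, hc, rfl⟩ := hd
    obtain ⟨hcne, hcch⟩ := hrun c hc
    constructor
    · simpa using hcne
    · rw [List.isChain_reverse]
      exact hcch
  have hDbr : List.IsChain (fun c d => ¬ mgiStep d.headI (c.getLast?.getD []))
      (((runsOf res).map List.reverse).reverse) := by
    rw [List.isChain_reverse, List.isChain_map]
    refine hbr.imp ?_
    intro a b hab
    simpa [mgiBreakRel, headI_eq_head?, List.head?_reverse, List.getLast?_reverse] using hab
  have hfwdrev : mgiFwdRev none 0 res.reverse =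
      (((runsOf res).map List.reverse).reverse).flatMap (fun d => List.range' 1 d.length) := by
    rw [hDrev]
    exact fwd_eq_aux _ hDrun hDbr
  have hfwd : (mgiFwdRev none 0 res.reverse).reverse =
      (runsOf res).flatMap (fun c => (List.range' 1 c.length).reverse) := by
    rw [hfwdrev, flatMap_reverse, List.reverse_reverse, List.flatMap_map]
    simp
  -- the run lengths
  have hrunlen : List.zipWith (· + ·) (mgiBack none 0 res) ((mgiFwdRev none 0 res.reverse).reverse) =
      (runsOf res).flatMap (fun c => List.replicate c.length c.length) := by
    rw [hback, hfwd, zipWith_flatMap _ _ _ _ (by intro c _; simp)]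
    simp only [chunk_runlen]
  -- the zipped pairs
  have hzip : res.zip (List.zipWith (· + ·) (mgiBack none 0 res) ((mgiFwdRev none 0 res.reverse).reverse)) =
      (runsOf res).flatMap (fun c => c.map (fun r => (r, c.length))) := by
    rw [List.zip_eq_zipWith, hrunlen]
    have hzw := zipWith_flatMap Prod.mk (runsOf res) id (fun c => List.replicate c.length c.length)
      (by intro c _; simp)
    rw [List.flatMap_id, hflat] at hzw
    rw [hzw]
    simp only [id_eq, zip_replicate_self]
  rw [hzip, List.filterMap_flatMap]
  unfold mgiSel
  congr 1
  funext c
  rw [List.filterMap_map]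
  by_cases hk : min c.length 5 = k
  · simp [hk, List.filterMap_some]
  · simp [hk]

-- ===== VERDICT (by name: the statement is the Claim_ definition above) =====
theorem make_gradient_inputs_spec : Claim_equal_make_gradient_inputs := by
  intro l _ hpre
  unfold Spec_make_gradient_inputs
  obtain ⟨hlen, hne⟩ := hpre
  match l with
  | [] => simp at hlen
  | [_] => simp at hlen
  | residues :: below :: rest =>
    have hne' : ∀ r, r ∈ residues → r ≠ [] := by
      intro r hr; exact hne r (by simpa using hr)
    -- A's side: the loop plus the final flush equals the flush fold over the runs
    obtain ⟨rf, hA⟩ := loop_eq residues [] [] [] [] [] [] 0 hne' (by simp)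
    rcases hP : residues.foldl mgiGroupStep ([], []) with ⟨clusters, cur⟩
    rw [hP] at hA
    have hC : (if cur ≠ [] then clusters ++ [cur] else clusters) = runsOf residues := by
      have := group_eq_runsOf residues
      rw [hP] at this
      exact this
    rcases hT : clusters.foldl mgiFlush ([], [], [], [], []) with ⟨t5, t4, t3, t2, t1⟩
    rw [hT] at hA
    have hAval : make_gradient_inputs (residues :: below :: rest) =
        [(mgiFlush (t5, t4, t3, t2, t1) cur).1,
         (mgiFlush (t5, t4, t3, t2, t1) cur).2.1,
         (mgiFlush (t5, t4, t3, t2, t1) cur).2.2.1,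
         (mgiFlush (t5, t4, t3, t2, t1) cur).2.2.2.1,
         (mgiFlush (t5, t4, t3, t2, t1) cur).2.2.2.2, below] := by
      show (match residues :: below :: rest with
        | residues :: below :: _ =>
          let st := residues.foldl mgiStepA ([], [], [], [], [], [], 0)
          let (c5, c4, c3, c2, nc, cur, _) := st
          if cur.length ≥ 5 then [c5 ++ cur, c4, c3, c2, nc, below]
          else if cur.length = 4 then [c5, c4 ++ cur, c3, c2, nc, below]
          else if cur.length = 3 then [c5, c4, c3 ++ cur, c2, nc, below]
          else if cur.length = 2 then [c5, c4, c3, c2 ++ cur, nc, below]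
          else if cur.length = 1 then [c5, c4, c3, c2, nc ++ cur, below]
          else [c5, c4, c3, c2, nc, below]
        | _ => []) = _
      simp only [hA, finalA_eq]
    -- the flush of the runs, componentwise
    have hfold : (runsOf residues).foldl mgiFlush ([], [], [], [], []) =
        (mgiSel 5 (runsOf residues), mgiSel 4 (runsOf residues), mgiSel 3 (runsOf residues),
         mgiSel 2 (runsOf residues), mgiSel 1 (runsOf residues)) := by
      rw [flush_fold]
      simp
    have hflushC : mgiFlush (t5, t4, t3, t2, t1) cur = ((runsOf residues).foldl mgiFlush ([], [], [], [], [])) := by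
      rw [← hC]
      by_cases hcur : cur = []
      · subst hcur
        simp only [ne_eq, not_true_eq_false, if_false]
        rw [hT]
        simp [mgiFlush]
      · simp only [ne_eq, hcur, not_false_eq_true, if_true]
        rw [List.foldl_append, hT]
        rfl
    rw [hAval, hflushC, hfold]
    -- B's side
    show _ = make_gradient_inputs_alt (residues :: below :: rest)
    unfold make_gradient_inputs_alt
    simp only [List.headI, List.tail_cons]
    rw [alt_bucket residues 5, alt_bucket residues 4, alt_bucket residues 3,
      alt_bucket residues 2, alt_bucket residues 1]
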